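-- pv_equiv track=rewrite | github.com/gujiprogram/DynaFix | DynaFix/DebugInfoFetch/ExtractDebugInfo.py | parse_id_range
-- ===== SOURCE A (Python) =====
-- def parse_id_range(id_range_str):
--     """
--     Parse ID range strings like '1-5,7-40,42' or '1,3-4', returning a list of integers.
--     """
--     ids = set()
--     for part in id_range_str.split(','):
--         part = part.strip()
--         if '-' in part:
--             start, end = map(int, part.split('-'))
--             ids.update(range(start, end + 1))
--         else:
--             ids.add(int(part))
--     return sorted(ids)
-- ===== SOURCE B (Python) =====
-- def parse_id_range(id_range_str):
--     """
--     Parse ID range strings like '1-5,7-40,42' or '1,3-4', returning a list of integers.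
--     """
--     intervals = []
--     for part in id_range_str.split(','):
--         part = part.strip()
--         if '-' in part:
--             a, b = part.split('-')
--             intervals.append((int(a), int(b)))
--         else:
--             n = int(part)
--             intervals.append((n, n))
--     intervals.sort(key=lambda iv: iv[0])
--     out = []
--     for s, e in intervals:
--         if out and s <= out[-1]:
--             s = out[-1] + 1
--         out.extend(range(s, e + 1))
--     return out
-- ===== Notes on version B (the rewrite author's own statement) =====
-- stated objective: alternative
-- what changed: A flattens every id of every part into a set and sorts all n ids; B keeps each part as a (start,end) interval, sorts only the k intervals by start, then emits the ids in one clamped sweep that skips overlaps.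
import Mathlib
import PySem

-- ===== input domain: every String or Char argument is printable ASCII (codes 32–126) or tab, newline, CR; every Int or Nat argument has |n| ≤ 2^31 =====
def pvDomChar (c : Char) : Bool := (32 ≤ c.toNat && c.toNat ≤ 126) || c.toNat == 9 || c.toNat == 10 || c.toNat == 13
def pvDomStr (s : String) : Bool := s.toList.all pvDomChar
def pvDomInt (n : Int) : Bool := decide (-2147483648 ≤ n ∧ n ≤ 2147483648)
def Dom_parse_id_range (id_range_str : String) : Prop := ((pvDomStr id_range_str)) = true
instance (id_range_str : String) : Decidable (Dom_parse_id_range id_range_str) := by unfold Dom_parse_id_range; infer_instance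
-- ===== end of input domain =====

-- B replaces A's "flatten every id into a set, then sort" by "collect (start,end) intervals,
-- sort them by start, then one clamped sweep emitting each id once" (objective: alternative).


-- ===== PORT A =====
def parse_id_range (id_range_str : String) : List Int :=
  let ids : PySem.Set Int :=
    (PySem.Chars.splitOn id_range_str.toList [',']).foldl (fun ids part =>
      let p := PySem.Chars.strip part
      if PySem.Chars.isIn ['-'] p then
        -- 'start, end = map(int, part.split('-'))': exactly two pieces, else ValueError (outside Pre_)
        let pieces := PySem.Chars.splitOn p ['-']
        if pieces.length == 2 then
          PySem.Set.update ids
            (PySem.List.pyRange ((PySem.Int.ofChars? (pieces.getD 0 [])).getD 0)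
              (((PySem.Int.ofChars? (pieces.getD 1 [])).getD 0) + 1))
        else ids
      else
        PySem.Set.add ids ((PySem.Int.ofChars? p).getD 0)) PySem.Set.empty
  PySem.List.sorted ids (fun x => x)

-- ===== PORT B =====
def parse_id_range_alt (id_range_str : String) : List Int :=
  let intervals : List (Int × Int) :=
    (PySem.Chars.splitOn id_range_str.toList [',']).foldl (fun acc part =>
      let p := PySem.Chars.strip part
      if PySem.Chars.isIn ['-'] p then
        let pieces := PySem.Chars.splitOn p ['-']
        if pieces.length == 2 then
          acc ++ [((PySem.Int.ofChars? (pieces.getD 0 [])).getD 0, (PySem.Int.ofChars? (pieces.getD 1 [])).getD 0)]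
        else acc
      else
        acc ++ [((PySem.Int.ofChars? p).getD 0, (PySem.Int.ofChars? p).getD 0)]) []
  (PySem.List.sorted intervals Prod.fst).foldl (fun out iv =>
    let s : Int :=
      match out.getLast? with
      | some l => if iv.1 ≤ l then l + 1 else iv.1
      | none => iv.1
    out ++ PySem.List.pyRange s (iv.2 + 1)) []

-- ===== PRECONDITION & SPEC =====
-- a comma part is OK when (after strip) it is an int literal, or has '-' and splits on '-' into
-- exactly two int literals; Pre_ admits exactly the strings all of whose parts are OK (elsewhere
-- Python A raises ValueError)
def pidPartOK (part : List Char) : Bool :=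
  let p := PySem.Chars.strip part
  if PySem.Chars.isIn ['-'] p then
    (PySem.Chars.splitOn p ['-']).length == 2 &&
      (PySem.Chars.splitOn p ['-']).all (fun q => (PySem.Int.ofChars? q).isSome)
  else (PySem.Int.ofChars? p).isSome

def Pre_parse_id_range (id_range_str : String) : Prop :=
  ∀ part ∈ PySem.Chars.splitOn id_range_str.toList [','], pidPartOK part = true
instance (id_range_str : String) : Decidable (Pre_parse_id_range id_range_str) := by
  unfold Pre_parse_id_range; infer_instance

def pvWitness_parse_id_range : String := "2-4,9"

def Spec_parse_id_range (id_range_str : String) (out : List Int) : Prop := out = parse_id_range_alt id_range_str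
instance (id_range_str : String) (out : List Int) : Decidable (Spec_parse_id_range id_range_str out) := by unfold Spec_parse_id_range; infer_instance

-- ===== CLAIM (what is proved, stated in full; the proofs are below) =====
def Claim_equal_parse_id_range : Prop := ∀ (id_range_str : String), Dom_parse_id_range id_range_str → Pre_parse_id_range id_range_str → Spec_parse_id_range id_range_str (parse_id_range id_range_str)

-- ===== LEMMAS AND PROOFS =====

-- the interval a (parse-OK) part denotes: (n, n) for a plain int, (start, end) for a range
def pidIv (part : List Char) : Int × Int :=
  let p := PySem.Chars.strip part
  if PySem.Chars.isIn ['-'] p then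
    (((PySem.Int.ofChars? ((PySem.Chars.splitOn p ['-']).getD 0 [])).getD 0),
     ((PySem.Int.ofChars? ((PySem.Chars.splitOn p ['-']).getD 1 [])).getD 0))
  else ((PySem.Int.ofChars? p).getD 0, (PySem.Int.ofChars? p).getD 0)

-- A's per-part set step, expressed through pidIv
def pidSetStep (ids : PySem.Set Int) (iv : Int × Int) : PySem.Set Int :=
  PySem.Set.update ids (PySem.List.pyRange iv.1 (iv.2 + 1))

-- B's sweep step
def pidSweepStep (out : List Int) (iv : Int × Int) : List Int :=
  let s : Int :=
    match out.getLast? with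
    | some l => if iv.1 ≤ l then l + 1 else iv.1
    | none => iv.1
  out ++ PySem.List.pyRange s (iv.2 + 1)

lemma parse_id_range_eq (s : String) (h : Pre_parse_id_range s) :
    parse_id_range s =
      PySem.List.sorted
        (((PySem.Chars.splitOn s.toList [',']).map pidIv).foldl pidSetStep PySem.Set.empty)
        (fun x => x) := by
  simp only [parse_id_range]
  rw [List.foldl_map]
  congr 1
  apply PySem.List.foldl_congr_mem
  intro ids part hpart
  have hOK := h part hpart
  unfold pidPartOK at hOK
  unfold pidIv pidSetStep
  simp only at hOK ⊢
  by_cases hin : PySem.Chars.isIn ['-'] (PySem.Chars.strip part) = true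
  · rw [if_pos hin] at hOK ⊢
    rw [Bool.and_eq_true] at hOK
    simp [hin, hOK.1]
  · rw [if_neg hin] at hOK ⊢
    simp [hin, PySem.Set.update, PySem.List.pyRange_one_singleton]

lemma parse_id_range_alt_eq (s : String) (h : Pre_parse_id_range s) :
    parse_id_range_alt s =
      (PySem.List.sorted ((PySem.Chars.splitOn s.toList [',']).map pidIv) Prod.fst).foldl
        pidSweepStep [] := by
  simp only [parse_id_range_alt]
  have hfold : (PySem.Chars.splitOn s.toList [',']).foldl (fun acc part =>
      if PySem.Chars.isIn ['-'] (PySem.Chars.strip part) then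
        if (PySem.Chars.splitOn (PySem.Chars.strip part) ['-']).length == 2 then
          acc ++ [((PySem.Int.ofChars? ((PySem.Chars.splitOn (PySem.Chars.strip part) ['-']).getD 0 [])).getD 0,
                   (PySem.Int.ofChars? ((PySem.Chars.splitOn (PySem.Chars.strip part) ['-']).getD 1 [])).getD 0)]
        else acc
      else
        acc ++ [((PySem.Int.ofChars? (PySem.Chars.strip part)).getD 0,
                 (PySem.Int.ofChars? (PySem.Chars.strip part)).getD 0)]) []
      = (PySem.Chars.splitOn s.toList [',']).map pidIv := by
    have := PySem.List.foldl_congr_mem (l := PySem.Chars.splitOn s.toList [','])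
      (f := fun acc part =>
        if PySem.Chars.isIn ['-'] (PySem.Chars.strip part) then
          if (PySem.Chars.splitOn (PySem.Chars.strip part) ['-']).length == 2 then
            acc ++ [((PySem.Int.ofChars? ((PySem.Chars.splitOn (PySem.Chars.strip part) ['-']).getD 0 [])).getD 0,
                     (PySem.Int.ofChars? ((PySem.Chars.splitOn (PySem.Chars.strip part) ['-']).getD 1 [])).getD 0)]
          else acc
        else
          acc ++ [((PySem.Int.ofChars? (PySem.Chars.strip part)).getD 0,
                   (PySem.Int.ofChars? (PySem.Chars.strip part)).getD 0)])
      (g := fun acc part => acc ++ [pidIv part]) (init := ([] : List (Int × Int))) ?_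
    · rw [this, PySem.List.foldl_append_singleton_eq_map]
      simp
    · intro acc part hpart
      have hOK := h part hpart
      unfold pidPartOK at hOK
      unfold pidIv
      simp only at hOK ⊢
      by_cases hin : PySem.Chars.isIn ['-'] (PySem.Chars.strip part) = true
      · rw [if_pos hin] at hOK ⊢
        rw [Bool.and_eq_true] at hOK
        simp [hin, hOK.1]
      · rw [if_neg hin] at hOK ⊢
        simp [hin]
  rw [hfold]
  rfl

lemma mem_update (s : PySem.Set Int) (xs : List Int) (v : Int) :
    v ∈ PySem.Set.update s xs ↔ v ∈ s ∨ v ∈ xs := by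
  induction xs generalizing s with
  | nil => simp [PySem.Set.update]
  | cons x xs ih =>
    show v ∈ PySem.Set.update (PySem.Set.add s x) xs ↔ _
    rw [ih, PySem.Set.mem_add]
    simp; tauto

lemma nodup_update (s : PySem.Set Int) (xs : List Int) (h : s.Nodup) :
    (PySem.Set.update s xs).Nodup := by
  induction xs generalizing s with
  | nil => exact h
  | cons x xs ih =>
    refine ih (PySem.Set.add s x) ?_
    unfold PySem.Set.add
    split_ifs with hc
    · exact h
    · simp only [PySem.Set.contains, Bool.not_eq_true] at hc
      simp [List.nodup_append, h]
      intro a ha he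
      rw [he] at ha
      rw [List.contains_eq_mem, decide_eq_false_iff_not] at hc
      exact hc ha

lemma mem_setfold (ivs : List (Int × Int)) (s : PySem.Set Int) (v : Int) :
    v ∈ ivs.foldl pidSetStep s ↔ v ∈ s ∨ ∃ iv ∈ ivs, iv.1 ≤ v ∧ v ≤ iv.2 := by
  induction ivs generalizing s with
  | nil => simp
  | cons iv ivs ih =>
    rw [List.foldl_cons, ih]
    unfold pidSetStep
    rw [mem_update]
    simp only [PySem.List.mem_pyRange_one, List.mem_cons]
    constructor
    · rintro ((h | h) | ⟨jv, hjv, h1, h2⟩)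
      · exact Or.inl h
      · exact Or.inr ⟨iv, Or.inl rfl, h.1, by omega⟩
      · exact Or.inr ⟨jv, Or.inr hjv, h1, h2⟩
    · rintro (h | ⟨jv, (rfl | hjv), h1, h2⟩)
      · exact Or.inl (Or.inl h)
      · exact Or.inl (Or.inr ⟨h1, by omega⟩)
      · exact Or.inr ⟨jv, hjv, h1, h2⟩

lemma nodup_setfold (ivs : List (Int × Int)) (s : PySem.Set Int) (h : s.Nodup) :
    (ivs.foldl pidSetStep s).Nodup := by
  induction ivs generalizing s with
  | nil => exact h
  | cons iv ivs ih => exact ih _ (nodup_update _ _ h)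

lemma pairwise_le_getLast (out : List Int) (l : Int) (hp : out.Pairwise (· < ·))
    (hl : out.getLast? = some l) : l ∈ out ∧ ∀ v ∈ out, v ≤ l := by
  induction out with
  | nil => simp at hl
  | cons a t ih =>
    cases t with
    | nil =>
      simp at hl
      subst hl; simp
    | cons b t' =>
      rw [List.getLast?_cons_cons] at hl
      rw [List.pairwise_cons] at hp
      obtain ⟨hlmem, hle⟩ := ih hp.2 hl
      refine ⟨List.mem_cons_of_mem _ hlmem, ?_⟩
      intro v hv
      rcases List.mem_cons.mp hv with rfl | hv
      · exact le_of_lt (hp.1 l hlmem)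
      · exact hle v hv

-- the sweep invariant: processed intervals P, remaining rest (starts nondecreasing and ≥ starts of P)
lemma sweep (rest : List (Int × Int)) : ∀ (P : List (Int × Int)) (out : List Int),
    (∀ v, v ∈ out ↔ ∃ iv ∈ P, iv.1 ≤ v ∧ v ≤ iv.2) →
    out.Pairwise (· < ·) →
    (∀ iv ∈ rest, ∀ jv ∈ P, jv.1 ≤ iv.1) →
    rest.Pairwise (fun a b => a.1 ≤ b.1) →
    (rest.foldl pidSweepStep out).Pairwise (· < ·) ∧
      ∀ v, v ∈ rest.foldl pidSweepStep out ↔ ∃ iv ∈ P ++ rest, iv.1 ≤ v ∧ v ≤ iv.2 := by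
  induction rest with
  | nil =>
    intro P out hP hout _ _
    exact ⟨hout, fun v => by simpa using hP v⟩
  | cons iv rest ih =>
    intro P out hP hout hord hordR
    rw [List.foldl_cons]
    rw [List.pairwise_cons] at hordR
    -- the clamped start
    set s' : Int := (match out.getLast? with
      | some l => if iv.1 ≤ l then l + 1 else iv.1
      | none => iv.1) with hs'
    have hstep : pidSweepStep out iv = out ++ PySem.List.pyRange s' (iv.2 + 1) := rfl
    have hss : iv.1 ≤ s' := by
      rw [hs']
      cases hgl : out.getLast? with
      | none => simp
      | some l =>
        simp only
        split_ifs with hc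
        · omega
        · omega
    have hgt : ∀ v ∈ out, v < s' := by
      intro v hv
      rw [hs']
      cases hgl : out.getLast? with
      | none =>
        rw [List.getLast?_eq_none_iff] at hgl
        rw [hgl] at hv; simp at hv
      | some l =>
        obtain ⟨_, hle⟩ := pairwise_le_getLast out l hout hgl
        have := hle v hv
        simp only
        split_ifs with hc
        · omega
        · omega
    have hpair' : (pidSweepStep out iv).Pairwise (· < ·) := by
      rw [hstep, List.pairwise_append]
      refine ⟨hout, PySem.List.pairwise_lt_pyRange_one _ _, ?_⟩
      intro a ha b hb
      rw [PySem.List.mem_pyRange_one] at hb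
      have := hgt a ha
      omega
    have hmem' : ∀ v, v ∈ pidSweepStep out iv ↔ ∃ jv ∈ P ++ [iv], jv.1 ≤ v ∧ v ≤ jv.2 := by
      intro v
      rw [hstep]
      simp only [List.mem_append, PySem.List.mem_pyRange_one, List.mem_singleton]
      constructor
      · rintro (hv | ⟨h1, h2⟩)
        · obtain ⟨jv, hjv, h⟩ := (hP v).mp hv
          exact ⟨jv, Or.inl hjv, h⟩
        · exact ⟨iv, Or.inr rfl, by omega, by omega⟩
      · rintro ⟨jv, (hjv | rfl), h1, h2⟩
        · exact Or.inl ((hP v).mpr ⟨jv, hjv, h1, h2⟩)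
        · by_cases hsv : s' ≤ v
          · exact Or.inr ⟨hsv, by omega⟩
          · -- v < s' : the clamp fired, so v is already covered by an earlier interval
            rw [hs'] at hsv
            cases hgl : out.getLast? with
            | none => rw [hgl] at hsv; simp at hsv; omega
            | some l =>
              rw [hgl] at hsv
              simp only at hsv
              split_ifs at hsv with hc
              · obtain ⟨hlmem, _⟩ := pairwise_le_getLast out l hout hgl
                obtain ⟨kv, hkv, hk1, hk2⟩ := (hP l).mp hlmem
                have hk3 : kv.1 ≤ jv.1 := hord jv List.mem_cons_self kv hkv
                exact Or.inl ((hP v).mpr ⟨kv, hkv, by omega, by omega⟩)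
              · omega
    have hord' : ∀ a ∈ rest, ∀ jv ∈ P ++ [iv], jv.1 ≤ a.1 := by
      intro a ha jv hjv
      rcases List.mem_append.mp hjv with hjv | hjv
      · exact hord a (List.mem_cons_of_mem _ ha) jv hjv
      · rw [List.mem_singleton] at hjv; subst hjv
        exact hordR.1 a ha
    have := ih (P ++ [iv]) (pidSweepStep out iv) hmem' hpair' hord' hordR.2
    refine ⟨this.1, fun v => ?_⟩
    rw [this.2 v]
    simp

-- ===== VERDICT (by name: the statement is the Claim_ definition above) =====
theorem parse_id_range_spec : Claim_equal_parse_id_range := by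
  intro s _ hpre
  unfold Spec_parse_id_range
  rw [parse_id_range_eq s hpre, parse_id_range_alt_eq s hpre]
  set ivs := (PySem.Chars.splitOn s.toList [',']).map pidIv with hivs
  have hordR : (PySem.List.sorted ivs Prod.fst).Pairwise (fun a b => a.1 ≤ b.1) :=
    PySem.List.sorted_pairwise ivs Prod.fst
  have hsw := sweep (PySem.List.sorted ivs Prod.fst) [] []
    (by simp) (by simp) (by simp) hordR
  set ys := (PySem.List.sorted ivs Prod.fst).foldl pidSweepStep [] with hys
  have hmemys : ∀ v, v ∈ ys ↔ ∃ iv ∈ ivs, iv.1 ≤ v ∧ v ≤ iv.2 := by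
    intro v
    rw [hsw.2 v]
    constructor
    · rintro ⟨iv, hiv, h1, h2⟩
      exact ⟨iv, (PySem.List.sorted_perm ivs Prod.fst false).mem_iff.mp (by simpa using hiv), h1, h2⟩
    · rintro ⟨iv, hiv, h1, h2⟩
      exact ⟨iv, by simpa using (PySem.List.sorted_perm ivs Prod.fst false).mem_iff.mpr hiv, h1, h2⟩
  have hmemS : ∀ v, v ∈ ivs.foldl pidSetStep PySem.Set.empty ↔ ∃ iv ∈ ivs, iv.1 ≤ v ∧ v ≤ iv.2 := by
    intro v; rw [mem_setfold]; simp [PySem.Set.empty]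
  have hnodupS : (ivs.foldl pidSetStep PySem.Set.empty).Nodup :=
    nodup_setfold ivs _ (by simp [PySem.Set.empty])
  have hnodupys : ys.Nodup := hsw.1.imp (fun h => ne_of_lt h)
  have hperm : ys.Perm (ivs.foldl pidSetStep PySem.Set.empty) := by
    rw [List.perm_ext_iff_of_nodup hnodupys hnodupS]
    intro v; rw [hmemys v, hmemS v]
  exact (PySem.List.sorted_eq_of_perm_of_pairwise_lt _ ys (fun x => x) hperm hsw.1)
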